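-- pv_equiv track=rewrite | github.com/justinjo/advent-of-code | python/2019/advent_2019_day_16.py | fft_upper_half
-- ===== SOURCE A (Python) =====
-- def fft_upper_half(arr: list[int]) -> list[int]:
--     # perform fft for only the upper half of an array. arr arg is array[len//2:]
--     next_phase = [0] * len(arr)
--     running_sum = 0
--     for i in range(len(arr) - 1, -1, -1):
--         running_sum += arr[i]
--         if running_sum >= 0 or running_sum % 10 == 0:
--             next_phase[i] = running_sum % 10
--         else:
--             next_phase[i] = 10 - (running_sum % 10)
--     return next_phase
-- ===== SOURCE B (Python) =====
-- def fft_upper_half(arr: list[int]) -> list[int]: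
--     # Forward pass: digit at i is abs(total - prefix_sum_before_i) % 10,
--     # since total - prefix_before_i equals the suffix sum from i.
--     total = sum(arr)
--     out = []
--     prefix = 0
--     for x in arr:
--         out.append(abs(total - prefix) % 10)
--         prefix += x
--     return out
-- ===== Notes on version B (the rewrite author's own statement) =====
-- stated objective: alternative
-- what changed: B replaces A's backward index loop that writes digits of a running suffix sum into a preallocated array by a forward pass that precomputes the total once and appends abs(total - prefix) % 10 while maintaining a prefix sum.
import Mathlib
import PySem

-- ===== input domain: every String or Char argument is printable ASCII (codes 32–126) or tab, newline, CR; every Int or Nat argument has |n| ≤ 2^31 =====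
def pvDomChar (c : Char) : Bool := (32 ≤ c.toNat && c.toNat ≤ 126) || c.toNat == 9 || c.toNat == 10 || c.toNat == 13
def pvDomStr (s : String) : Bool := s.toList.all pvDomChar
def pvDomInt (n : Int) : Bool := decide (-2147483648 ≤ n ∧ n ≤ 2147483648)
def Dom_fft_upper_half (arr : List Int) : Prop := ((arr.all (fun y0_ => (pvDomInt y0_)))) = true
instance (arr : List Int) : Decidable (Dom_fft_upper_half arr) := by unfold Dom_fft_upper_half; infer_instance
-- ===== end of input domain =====

-- B replaces A's backward loop (running suffix sum written into a preallocated array)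
-- by a forward pass appending abs(total - prefix) % 10; same O(n) cost, different decomposition.

-- ===== PORT A =====
-- backward index loop: i = len-1 .. 0, running suffix sum, next_phase[i] := digit.
-- arr[i] is always in range here, so pyGetD arr i 0 is exact for Python's arr[i].
def fft_upper_half (arr : List Int) : List Int :=
  ((PySem.List.pyRange ((arr.length : Int) - 1) (-1) (-1)).foldl
    (fun (st : Int × List Int) i =>
      let rs := st.1 + PySem.List.pyGetD arr i 0
      if 0 ≤ rs ∨ PySem.Int.mod rs 10 = 0 then
        (rs, st.2.set i.toNat (PySem.Int.mod rs 10))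
      else
        (rs, st.2.set i.toNat (10 - PySem.Int.mod rs 10)))
    (0, List.replicate arr.length 0)).2

-- ===== PORT B =====
def fft_upper_half_alt (arr : List Int) : List Int :=
  let total := arr.sum
  (arr.foldl
    (fun (st : Int × List Int) x =>
      (st.1 + x, st.2 ++ [PySem.Int.mod |total - st.1| 10]))
    (0, [])).2

-- ===== PRECONDITION & SPEC =====
def Spec_fft_upper_half (arr : List Int) (out : List Int) : Prop := out = fft_upper_half_alt arr
instance (arr : List Int) (out : List Int) : Decidable (Spec_fft_upper_half arr out) := by unfold Spec_fft_upper_half; infer_instance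

-- ===== CLAIM (what is proved, stated in full; the proofs are below) =====
def Claim_equal_fft_upper_half : Prop := ∀ (arr : List Int), Dom_fft_upper_half arr → Spec_fft_upper_half arr (fft_upper_half arr)

-- ===== LEMMAS AND PROOFS =====

-- digit of a suffix sum, and the common reference function g
def pvDig (r : Int) : Int := PySem.Int.mod |r| 10

def pvG : List Int → List Int
  | [] => []
  | x :: xs => pvDig (x + xs.sum) :: pvG xs

-- A's branch expression computes pvDig
theorem pvDig_eq (r : Int) :
    (if 0 ≤ r ∨ PySem.Int.mod r 10 = 0 then PySem.Int.mod r 10 else 10 - PySem.Int.mod r 10)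
      = pvDig r := by
  have hm : ∀ a : Int, PySem.Int.mod a 10 = a % 10 :=
    fun a => PySem.Int.mod_eq_emod_of_pos (by norm_num)
  simp only [pvDig, hm]
  by_cases h : 0 ≤ r
  · rw [abs_of_nonneg h]; simp [h]
  · rw [abs_of_neg (by omega : r < 0)]; split_ifs with hc <;> omega

-- ===== A-side: the backward fold realises pvG =====

theorem pvA_foldr (arr : List Int) :
    ∀ (m k : Nat), k + m = arr.length →
    (PySem.List.pyRange (k : Int) (arr.length : Int) 1).foldr
      (fun i (st : Int × List Int) =>
        let rs := st.1 + PySem.List.pyGetD arr i 0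
        if 0 ≤ rs ∨ PySem.Int.mod rs 10 = 0 then
          (rs, st.2.set i.toNat (PySem.Int.mod rs 10))
        else
          (rs, st.2.set i.toNat (10 - PySem.Int.mod rs 10)))
      (0, List.replicate arr.length 0)
      = ((arr.drop k).sum, List.replicate k 0 ++ pvG (arr.drop k)) := by
  intro m
  induction m with
  | zero =>
      intro k hk
      have hk' : k = arr.length := by omega
      subst hk'
      rw [PySem.List.pyRange_one_eq_nil (le_refl _)]
      simp [pvG, List.drop_length]
  | succ m ih =>
      intro k hk
      have hk1 : k < arr.length := by omega
      have hklt : (k : Int) < (arr.length : Int) := by exact_mod_cast hk1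
      rw [PySem.List.pyRange_one_cons hklt, List.foldr_cons,
          show ((k : Int) + 1) = ((k + 1 : Nat) : Int) by push_cast; ring,
          ih (k + 1) (by omega)]
      have hget : PySem.List.pyGetD arr (k : Int) 0 = arr[k] := by
        simp [PySem.List.pyGetD_of_nonneg, List.getElem?_eq_getElem hk1]
      have hdrop : arr.drop k = arr[k] :: arr.drop (k + 1) := List.drop_eq_getElem_cons hk1
      have hrs : (arr.drop (k + 1)).sum + arr[k] = (arr.drop k).sum := by
        rw [hdrop, List.sum_cons]; ring
      have hset : ∀ v : Int,
          (List.replicate (k+1) (0:Int) ++ pvG (arr.drop (k+1))).set ((k:Int)).toNat v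
            = List.replicate k 0 ++ (v :: pvG (arr.drop (k+1))) := by
        intro v
        rw [show List.replicate (k+1) (0:Int) = List.replicate k 0 ++ [0] by
              simp [List.replicate_succ'],
            List.append_assoc, Int.toNat_natCast, List.set_append]
        simp
      have hgk : pvG (arr.drop k)
          = pvDig ((arr.drop (k+1)).sum + arr[k]) :: pvG (arr.drop (k+1)) := by
        rw [hdrop]; simp only [pvG]; congr 2; ring
      have hdig := pvDig_eq ((arr.drop (k+1)).sum + arr[k])
      simp only [hget]
      rw [hgk, ← hdig, ← hrs]
      split_ifs with h <;> exact congrArg₂ Prod.mk rfl (hset _)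

theorem pvA_eq_pvG (arr : List Int) : fft_upper_half arr = pvG arr := by
  unfold fft_upper_half
  rw [PySem.List.pyRange_neg_one_eq_reverse, List.foldl_reverse]
  have h := pvA_foldr arr arr.length 0 (by omega)
  simp only [Nat.cast_zero, List.drop_zero, List.replicate_zero, List.nil_append] at h
  rw [show ((-1 : Int) + 1) = (0 : Int) by norm_num,
      show ((arr.length : Int) - 1 + 1) = (arr.length : Int) by ring]
  rw [h]

-- ===== B-side: the forward fold realises pvG =====

def pvBgen (total : Int) : Int → List Int → List Int
  | _, [] => []
  | p, x :: xs => pvDig (total - p) :: pvBgen total (p + x) xs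

theorem pvB_fold (total : Int) (l : List Int) :
    ∀ (p : Int) (acc : List Int),
    (l.foldl
      (fun (st : Int × List Int) x =>
        (st.1 + x, st.2 ++ [PySem.Int.mod |total - st.1| 10]))
      (p, acc)).2
      = acc ++ pvBgen total p l := by
  induction l with
  | nil => intro p acc; simp [pvBgen]
  | cons x xs ih =>
      intro p acc
      simp only [List.foldl_cons, pvBgen]
      rw [ih]
      simp [pvDig]

theorem pvBgen_eq_pvG (l : List Int) : ∀ p : Int, pvBgen (p + l.sum) p l = pvG l := by
  induction l with
  | nil => intro p; rfl
  | cons x xs ih =>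
      intro p
      simp only [pvBgen, pvG, List.sum_cons]
      congr 1
      · congr 1; ring
      · rw [show p + (x + xs.sum) = (p + x) + xs.sum by ring]
        exact ih (p + x)

theorem pvB_eq_pvG (arr : List Int) : fft_upper_half_alt arr = pvG arr := by
  unfold fft_upper_half_alt
  rw [pvB_fold]
  have := pvBgen_eq_pvG arr 0
  simp at this
  simp [this]

-- ===== VERDICT (by name: the statement is the Claim_ definition above) =====
theorem fft_upper_half_spec : Claim_equal_fft_upper_half := by
  intro arr _
  unfold Spec_fft_upper_half
  rw [pvA_eq_pvG, pvB_eq_pvG]
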